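-- pv_equiv track=rewrite | github.com/kanngji/thisisCodingTest | 프로그래머스/lv1/60.py | solution
-- ===== SOURCE A (Python) =====
-- def solution(keymap, targets):
--     answer = []
--     dict1={}
--     for i in keymap:
--         for j in i:
--             dict1[j]=i.index(j)+1
--     for i in targets:
--         score=0
--         for j in i:
--             if j in dict1:
--                 score+=dict1[j]
--             else:
--                 answer.append(-1)
--         if score!=0:
--             answer.append(score)
--
--     return answer
-- ===== SOURCE B (Python) =====
-- def solution(keymap, targets):
--     # Dict-free decomposition: compute each character's value directly from the
--     # keymaps, then emit each target's output as one segment ([-1]*misses + score).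
--     def last_position(c):
--         v = 0
--         for km in keymap:
--             p = km.find(c)
--             if p != -1:
--                 v = p + 1
--         return v
--
--     def segment(t):
--         vals = [last_position(c) for c in t]
--         score = sum(vals)
--         return [-1] * vals.count(0) + ([score] if score != 0 else [])
--
--     return [x for t in targets for x in segment(t)]
-- ===== Notes on version B (the rewrite author's own statement) =====
-- stated objective: alternative
-- what changed: B eliminates A's precomputed char->position dict and A's single interleaved accumulator loop: it computes each character's value by scanning the keymaps directly (last containing keymap wins) and emits each target's contribution as a self-contained segment ([-1] per missing char, then the score if nonzero), flattening the segments.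
import Mathlib
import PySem

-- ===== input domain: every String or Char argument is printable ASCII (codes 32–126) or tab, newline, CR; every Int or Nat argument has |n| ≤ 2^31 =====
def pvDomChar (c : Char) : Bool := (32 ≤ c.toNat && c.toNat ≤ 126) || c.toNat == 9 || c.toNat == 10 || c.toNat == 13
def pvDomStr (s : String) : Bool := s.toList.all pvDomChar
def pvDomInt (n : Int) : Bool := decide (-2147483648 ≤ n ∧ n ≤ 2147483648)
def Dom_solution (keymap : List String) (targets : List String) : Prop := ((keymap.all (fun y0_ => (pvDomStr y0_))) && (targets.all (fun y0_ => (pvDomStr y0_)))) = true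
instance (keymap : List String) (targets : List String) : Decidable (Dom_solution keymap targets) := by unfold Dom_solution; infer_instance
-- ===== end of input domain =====

-- B drops A's precomputed dict and interleaved accumulator loop, computing each
-- character's value by a direct keymap scan and emitting per-target segments
-- (alternative decomposition; return values proven equal).

-- ===== PORT A =====
-- dict1[j] = i.index(j) + 1, built over all keymaps (later keymaps overwrite)
def solutionDict (keymap : List String) : PySem.Dict Char Int :=
  keymap.foldl
    (fun d i => i.toList.foldl
      (fun d j => d.insert j (((PySem.List.index? i.toList j).getD 0 : Int) + 1)) d)
    PySem.Dict.empty

def solution (keymap : List String) (targets : List String) : List Int :=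
  let dict1 := solutionDict keymap
  targets.foldl
    (fun answer i =>
      let p := i.toList.foldl
        (fun (p : List Int × Int) j =>
          if dict1.contains j then (p.1, p.2 + dict1.getD j 0)
          else (p.1 ++ [-1], p.2))
        (answer, 0)
      if p.2 ≠ 0 then p.1 ++ [p.2] else p.1)
    []

-- ===== PORT B =====
-- 'v = 0; for km in keymap: p = km.find(c); if p != -1: v = p + 1'
def lastPosition (keymap : List String) (c : Char) : Int :=
  keymap.foldl
    (fun v km =>
      match PySem.List.index? km.toList c with
      | some p => (p : Int) + 1
      | none => v)
    0

-- '[-1] * vals.count(0) + ([score] if score != 0 else [])'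
def segB (keymap : List String) (t : String) : List Int :=
  let vals := t.toList.map (lastPosition keymap)
  let score := vals.sum
  List.replicate (vals.count 0) (-1) ++ (if score ≠ 0 then [score] else [])

def solution_alt (keymap : List String) (targets : List String) : List Int :=
  targets.flatMap (segB keymap)

-- ===== PRECONDITION & SPEC =====
def Spec_solution (keymap : List String) (targets : List String) (out : List Int) : Prop := out = solution_alt keymap targets
instance (keymap : List String) (targets : List String) (out : List Int) : Decidable (Spec_solution keymap targets out) := by unfold Spec_solution; infer_instance

-- ===== CLAIM (what is proved, stated in full; the proofs are below) =====
def Claim_equal_solution : Prop := ∀ (keymap : List String) (targets : List String), Dom_solution keymap targets → Spec_solution keymap targets (solution keymap targets)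

-- ===== LEMMAS AND PROOFS =====

-- optional-valued version of the keymap scan: last keymap containing c wins
def vOpt (kms : List String) (c : Char) : Option Int :=
  kms.foldl
    (fun v km =>
      match PySem.List.index? km.toList c with
      | some p => some ((p : Int) + 1)
      | none => v)
    none

theorem vOpt_foldl (kms : List String) (c : Char) (a : Option Int) :
    kms.foldl
      (fun v km =>
        match PySem.List.index? km.toList c with
        | some p => some ((p : Int) + 1)
        | none => v)
      a
    = (vOpt kms c).or a := by
  induction kms generalizing a with
  | nil => simp [vOpt]
  | cons km r ih =>
    show r.foldl _ _ = _
    rw [ih]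
    conv_rhs => rw [vOpt]; simp only [List.foldl_cons]
    rw [show (r.foldl _ _ : Option Int) = _ from ih _]
    cases h : PySem.List.index? km.toList c <;> cases hv : vOpt r c <;>
      simp only [h] <;> simp

theorem lastPosition_eq_vOpt (kms : List String) (c : Char) :
    lastPosition kms c = (vOpt kms c).getD 0 := by
  have gen : ∀ (a : Int),
      kms.foldl
        (fun v km =>
          match PySem.List.index? km.toList c with
          | some p => (p : Int) + 1
          | none => v)
        a
      = (vOpt kms c).getD a := by
    induction kms with
    | nil => intro a; simp [vOpt]
    | cons km r ih =>
      intro a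
      show r.foldl _ _ = _
      rw [ih]
      rw [show vOpt (km :: r) c = (vOpt r c).or _ from by
        rw [vOpt]; simp only [List.foldl_cons]; exact vOpt_foldl r c _]
      cases h : PySem.List.index? km.toList c <;> cases hv : vOpt r c <;>
        simp only [h] <;> simp
  exact gen 0

theorem vOpt_pos (kms : List String) (c : Char) (v : Int) (h : vOpt kms c = some v) : v ≠ 0 := by
  induction kms generalizing v with
  | nil => simp [vOpt] at h
  | cons km r ih =>
    rw [show vOpt (km :: r) c = (vOpt r c).or _ from by
      rw [vOpt]; simp only [List.foldl_cons]; exact vOpt_foldl r c _] at h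
    cases hv : vOpt r c with
    | some w =>
      rw [hv, Option.some_or] at h
      exact (Option.some.inj h) ▸ ih w hv
    | none =>
      rw [hv] at h
      cases hi : PySem.List.index? km.toList c with
      | some p =>
        simp only [hi, Option.none_or] at h
        have hp : (0 : Int) ≤ (p : Int) := Int.natCast_nonneg p
        have := Option.some.inj h
        omega
      | none => simp only [hi, Option.none_or] at h; exact absurd h (by simp)

theorem foldl_insert_get? (v : Char → Int) (l : List Char) (d : PySem.Dict Char Int) (c : Char) :
    (l.foldl (fun d j => d.insert j (v j)) d).get? c
      = if c ∈ l then some (v c) else d.get? c := by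
  induction l generalizing d with
  | nil => simp
  | cons j l ih =>
    simp only [List.foldl_cons, ih, PySem.Dict.get?_insert, List.mem_cons]
    by_cases hl : c ∈ l <;> by_cases hj : c = j <;> simp [hl, hj]

theorem build_get? (kms : List String) (d : PySem.Dict Char Int) (c : Char) :
    (kms.foldl
      (fun d i => i.toList.foldl
        (fun d j => d.insert j (((PySem.List.index? i.toList j).getD 0 : Int) + 1)) d)
      d).get? c
    = (vOpt kms c).or (d.get? c) := by
  induction kms generalizing d with
  | nil => simp [vOpt]
  | cons km r ih =>
    simp only [List.foldl_cons, ih]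
    rw [foldl_insert_get? (fun j => ((PySem.List.index? km.toList j).getD 0 : Int) + 1)]
    rw [show vOpt (km :: r) c = (vOpt r c).or _ from by
      rw [vOpt]; simp only [List.foldl_cons]; exact vOpt_foldl r c _]
    cases hv : vOpt r c with
    | some w => simp
    | none =>
      simp only [Option.none_or]
      cases hi : PySem.List.index? km.toList c with
      | some p =>
        have hm : c ∈ km.toList := by
          by_contra hm
          rw [(PySem.List.index?_eq_none_iff km.toList c).mpr hm] at hi
          cases hi
        rw [PySem.List.index?_eq_idxOf?] at hi
        simp [hm]
      | none =>
        rw [PySem.List.index?_eq_idxOf?] at hi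
        have hm : c ∉ km.toList := by
          intro hm
          have := (PySem.List.index?_isSome_iff km.toList c).mpr hm
          rw [PySem.List.index?_eq_idxOf?, hi] at this
          cases this
        simp [hm]

theorem dict_getD (keymap : List String) (c : Char) :
    (solutionDict keymap).getD c 0 = lastPosition keymap c := by
  rw [PySem.Dict.getD_eq_get?_getD, solutionDict, build_get?, lastPosition_eq_vOpt]
  simp

theorem dict_contains (keymap : List String) (c : Char) :
    (solutionDict keymap).contains c = decide (lastPosition keymap c ≠ 0) := by
  rw [PySem.Dict.contains_eq_isSome_get?, solutionDict, build_get?, lastPosition_eq_vOpt]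
  simp only [PySem.Dict.get?_empty, Option.or_none]
  cases h : vOpt keymap c with
  | none => simp
  | some v => simpa using vOpt_pos keymap c v h

-- A's per-character step, expressed through lastPosition
def stepB (keymap : List String) : (List Int × Int) → Char → (List Int × Int) :=
  fun p j =>
    if lastPosition keymap j ≠ 0 then (p.1, p.2 + lastPosition keymap j) else (p.1 ++ [-1], p.2)

theorem stepA_eq (keymap : List String) :
    (fun (p : List Int × Int) j =>
      if (solutionDict keymap).contains j then (p.1, p.2 + (solutionDict keymap).getD j 0)
      else (p.1 ++ [-1], p.2))
    = stepB keymap := by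
  funext p j
  rw [dict_contains, dict_getD, stepB]
  by_cases h : lastPosition keymap j = 0 <;> simp [h]

-- the per-target character loop of A produces exactly B's segB data
theorem innerA (keymap : List String) (l : List Char) (acc : List Int) (s : Int) :
    l.foldl (stepB keymap) (acc, s)
    = (acc ++ List.replicate ((l.map (lastPosition keymap)).count 0) (-1),
       s + (l.map (lastPosition keymap)).sum) := by
  induction l generalizing acc s with
  | nil => simp
  | cons c l ih =>
    rw [List.foldl_cons]
    by_cases h : lastPosition keymap c = 0
    · rw [show stepB keymap (acc, s) c = (acc ++ [-1], s) from by simp [stepB, h]]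
      rw [ih]
      simp only [List.map_cons, List.count_cons, List.sum_cons, h, Prod.mk.injEq, zero_add,
        and_true]
      simp [List.replicate_succ, List.append_assoc]
    · rw [show stepB keymap (acc, s) c = (acc, s + lastPosition keymap c) from by
        simp [stepB, h]]
      rw [ih]
      simp only [List.map_cons, List.count_cons, List.sum_cons, Prod.mk.injEq]
      have hb : (lastPosition keymap c == 0) = false := by simp [h]
      constructor
      · simp [hb]
      · ring

theorem outerA (keymap : List String) (ts : List String) (acc : List Int) :
    ts.foldl
      (fun answer i =>
        let p := i.toList.foldl (stepB keymap) (answer, 0)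
        if p.2 ≠ 0 then p.1 ++ [p.2] else p.1)
      acc
    = acc ++ ts.flatMap (segB keymap) := by
  induction ts generalizing acc with
  | nil => simp
  | cons t r ih =>
    simp only [List.foldl_cons, List.flatMap_cons]
    rw [ih]
    rw [← List.append_assoc]
    congr 1
    rw [innerA]
    simp only [zero_add]
    unfold segB
    dsimp only
    by_cases h : (t.toList.map (lastPosition keymap)).sum ≠ 0
    · rw [if_pos h, if_pos h, List.append_assoc]
    · rw [if_neg h, if_neg h, List.append_nil]

-- ===== VERDICT (by name: the statement is the Claim_ definition above) =====
theorem solution_spec : Claim_equal_solution := by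
  intro keymap targets _
  show solution keymap targets = solution_alt keymap targets
  unfold solution solution_alt
  simp only [stepA_eq]
  rw [outerA]
  simp
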